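-- pv_equiv track=rewrite | github.com/PRIVACTPC/Invisee-MacBook-version- | inviseeai(MacOS)DP(SMPC)/l_diversity.py | mask_similar_from_end
-- ===== SOURCE A (Python) =====
-- def mask_similar_from_end(base: str, neighbor: str, l: int) -> str:
--     """
--     Mask any runs of 1 to ℓ identical characters (at the same positions from the right)
--     between base and neighbor. Already masked characters ('*') are preserved.
--     """
--     base, neighbor = str(base), str(neighbor)
--     masked = list(base)
--     run = 0
--     for i in reversed(range(min(len(base), len(neighbor)))):
--         if base[i] == neighbor[i] and base[i] != "*":
--             run += 1
--         else:
--             if 0 < run <= l: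
--                 for j in range(i + 1, i + 1 + run):
--                     if masked[j] != "*":
--                         masked[j] = "*"
--             run = 0
--     if 0 < run <= l:
--         for j in range(len(base) - run, len(base)):
--             if masked[j] != "*":
--                 masked[j] = "*"
--     return "".join(masked)
-- ===== SOURCE B (Python) =====
-- def mask_similar_from_end(base: str, neighbor: str, l: int) -> str:
--     """Two-phase rewrite: build a match table, then a forward two-pointer pass
--     masking each maximal matching run of length <= l in place."""
--     base, neighbor = str(base), str(neighbor)
--     m = min(len(base), len(neighbor))
--     match = [base[i] == neighbor[i] and base[i] != "*" for i in range(m)]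
--     masked = list(base)
--     i = 0
--     while i < m:
--         if match[i]:
--             j = i
--             while j < m and match[j]:
--                 j += 1
--             if j - i <= l:
--                 for k in range(i, j):
--                     masked[k] = "*"
--             i = j
--         else:
--             i += 1
--     return "".join(masked)
-- ===== Notes on version B (the rewrite author's own statement) =====
-- stated objective: simpler
-- what changed: Replaced the right-to-left running-counter scan (with its redundant already-masked check and end-of-loop special case) by a two-phase forward pass that first builds a match table and then masks each maximal matching run of length <= l with a two-pointer scan.
-- intended difference: When the matching run touching index 0 has length p with 0 < p <= l and p < len(base), A masks the LAST p characters of base (positions len(base)-p..len(base)-1, e.g. A('ax','ay',1)='a*') because it reuses the right-aligned index len(base)-run for a left-aligned run; B masks the run itself (positions 0..p-1, B('ax','ay',1)='*x'), which is the intended value since those are the positions that actually match. — e.g. on mask_similar_from_end("ax", "ay", 1): A returns "a*", B returns "*x"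
import Mathlib
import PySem

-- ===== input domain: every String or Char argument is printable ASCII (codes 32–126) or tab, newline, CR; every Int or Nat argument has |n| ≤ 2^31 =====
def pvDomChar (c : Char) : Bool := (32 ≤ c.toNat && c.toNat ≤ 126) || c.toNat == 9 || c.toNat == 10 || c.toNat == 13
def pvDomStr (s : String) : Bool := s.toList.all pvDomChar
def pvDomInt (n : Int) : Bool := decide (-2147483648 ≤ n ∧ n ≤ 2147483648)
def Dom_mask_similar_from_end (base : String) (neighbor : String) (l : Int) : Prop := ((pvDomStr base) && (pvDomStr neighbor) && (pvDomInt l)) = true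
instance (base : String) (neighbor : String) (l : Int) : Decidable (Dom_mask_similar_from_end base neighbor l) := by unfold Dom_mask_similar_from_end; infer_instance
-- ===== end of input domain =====

-- B replaces A's right-to-left running-counter scan by a two-phase pass (build a match
-- table, then mask each maximal matching run of length ≤ l with a forward two-pointer
-- scan); objective: simpler. B also fixes A's misplaced mask for a run reaching index 0
-- (see D_ below).

-- ===== PORT A =====
-- inner loop 'for j in range(a, a+cnt): if masked[j] != "*": masked[j] = "*"'
-- (all j used are < masked.length, so List.set matches Python's item assignment)
def pvGmaskA (masked : List Char) (a : Nat) (cnt : Nat) : List Char :=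
  (List.range' a cnt).foldl (fun acc j => if acc.getD j ' ' ≠ '*' then acc.set j '*' else acc) masked

-- literal port of A: backward scan with a running counter 'run'; all indices read are
-- < min-length, so getD is exact for Python's base[i] / neighbor[i]
def mask_similar_from_end (base : String) (neighbor : String) (l : Int) : String :=
  let bs := base.toList
  let ns := neighbor.toList
  let m := min bs.length ns.length
  let r := ((List.range m).reverse).foldl
    (fun (s : List Char × Nat) (i : Nat) =>
      if bs.getD i ' ' == ns.getD i ' ' && bs.getD i ' ' != '*' then (s.1, s.2 + 1)
      else if 0 < s.2 ∧ (s.2 : Int) ≤ l then (pvGmaskA s.1 (i + 1) s.2, 0) else (s.1, 0))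
    (bs, 0)
  let masked := if 0 < r.2 ∧ (r.2 : Int) ≤ l then pvGmaskA r.1 (bs.length - r.2) r.2 else r.1
  String.mk masked

-- ===== PORT B =====
-- 'while j < m and match[j]: j += 1'  (fuel = m - j bounds the iteration count; pure totality guard)
def pvExtendGo (mt : List Bool) (m : Nat) : Nat → Nat → Nat
  | 0, j => j
  | fuel + 1, j => if j < m && mt.getD j false then pvExtendGo mt m fuel (j + 1) else j

def pvExtend (mt : List Bool) (m : Nat) (j : Nat) : Nat :=
  pvExtendGo mt m (m - j) j

-- 'for k in range(i, j): masked[k] = "*"'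
def pvMaskRunB (masked : List Char) (i : Nat) (j : Nat) : List Char :=
  (List.range' i (j - i)).foldl (fun acc k => acc.set k '*') masked

-- 'while i < m: …' forward two-pointer loop of B (fuel = m - i bounds the iteration count)
def pvLoopBGo (mt : List Bool) (l : Int) (m : Nat) : Nat → List Char → Nat → List Char
  | 0, masked, _ => masked
  | fuel + 1, masked, i =>
    if i < m then
      if mt.getD i false then
        let j := pvExtend mt m i
        let masked' := if ((j - i : Nat) : Int) ≤ l then pvMaskRunB masked i j else masked
        pvLoopBGo mt l m fuel masked' j
      else pvLoopBGo mt l m fuel masked (i + 1)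
    else masked

def pvLoopB (mt : List Bool) (l : Int) (m : Nat) (masked : List Char) (i : Nat) : List Char :=
  pvLoopBGo mt l m (m - i) masked i

def mask_similar_from_end_alt (base : String) (neighbor : String) (l : Int) : String :=
  let bs := base.toList
  let ns := neighbor.toList
  let m := min bs.length ns.length
  let mt := (List.range m).map (fun i => bs.getD i ' ' == ns.getD i ' ' && bs.getD i ' ' != '*')
  String.mk (pvLoopB mt l m bs 0)

-- ===== PRECONDITION & SPEC =====
-- When the maximal matching run touching index 0 has length p with 0 < p ≤ l and
-- p < len(base), A masks the LAST p characters of base (positions len(base)-p …) instead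
-- of the matching positions 0 … p-1; B masks the run itself, which is the intended value.
def D_mask_similar_from_end (base : String) (neighbor : String) (l : Int) : Prop :=
  let p := ((base.toList.zip neighbor.toList).takeWhile (fun ab => ab.1 == ab.2 && ab.1 != '*')).length
  0 < p ∧ (p : Int) ≤ l ∧ p < base.toList.length
instance (base : String) (neighbor : String) (l : Int) : Decidable (D_mask_similar_from_end base neighbor l) := by
  unfold D_mask_similar_from_end; infer_instance

def Spec_mask_similar_from_end (base : String) (neighbor : String) (l : Int) (out : String) : Prop :=
  ¬ D_mask_similar_from_end base neighbor l → out = mask_similar_from_end_alt base neighbor l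
instance (base : String) (neighbor : String) (l : Int) (out : String) : Decidable (Spec_mask_similar_from_end base neighbor l out) := by
  unfold Spec_mask_similar_from_end; infer_instance

def pvDiffWitness_mask_similar_from_end : String × String × Int := ("ax", "ay", 1)
def pvDiffWitnessOut_mask_similar_from_end : String × String := ("a*", "*x")

-- ===== CLAIM (what is proved, stated in full; the proofs are below) =====
def Claim_unchanged_mask_similar_from_end : Prop := ∀ (base : String) (neighbor : String) (l : Int), Dom_mask_similar_from_end base neighbor l → Spec_mask_similar_from_end base neighbor l (mask_similar_from_end base neighbor l)
def Claim_changed_mask_similar_from_end : Prop := Dom_mask_similar_from_end (pvDiffWitness_mask_similar_from_end.1) (pvDiffWitness_mask_similar_from_end.2.1) (pvDiffWitness_mask_similar_from_end.2.2) ∧ D_mask_similar_from_end (pvDiffWitness_mask_similar_from_end.1) (pvDiffWitness_mask_similar_from_end.2.1) (pvDiffWitness_mask_similar_from_end.2.2) ∧ mask_similar_from_end (pvDiffWitness_mask_similar_from_end.1) (pvDiffWitness_mask_similar_from_end.2.1) (pvDiffWitness_mask_similar_from_end.2.2) = pvDiffWitnessOut_mask_similar_from_end.1 ∧ mask_similar_from_end_alt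 (pvDiffWitness_mask_similar_from_end.1) (pvDiffWitness_mask_similar_from_end.2.1) (pvDiffWitness_mask_similar_from_end.2.2) = pvDiffWitnessOut_mask_similar_from_end.2 ∧ pvDiffWitnessOut_mask_similar_from_end.1 ≠ pvDiffWitnessOut_mask_similar_from_end.2
def Claim_exact_mask_similar_from_end : Prop := ∀ (base : String) (neighbor : String) (l : Int), Dom_mask_similar_from_end base neighbor l → D_mask_similar_from_end base neighbor l → mask_similar_from_end base neighbor l ≠ mask_similar_from_end_alt base neighbor l

-- ===== LEMMAS AND PROOFS =====

-- proof-only definitions: straight-line masking and run-by-run masking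

def pvMaskI (a : Nat) (r : Nat) (xs : List Char) : List Char :=
  match r with
  | 0 => xs
  | r + 1 => pvMaskI (a + 1) r (xs.set a '*')

def pvRuns (l : Int) (ms : List Bool) (off : Nat) (xs : List Char) : List Char :=
  match ms with
  | [] => xs
  | false :: rest => pvRuns l rest (off + 1) xs
  | true :: rest =>
      pvRuns l (rest.drop ((rest.takeWhile id).length))
        (off + ((rest.takeWhile id).length + 1))
        (if (((rest.takeWhile id).length + 1 : Nat) : Int) ≤ l
          then pvMaskI off ((rest.takeWhile id).length + 1) xs else xs)
termination_by ms.length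
decreasing_by
  all_goals simp only [List.length_drop, List.length_cons]
  all_goals omega

def pvFA (l : Int) (ms : List Bool) (off : Nat) (xs : List Char) : List Char × Nat :=
  match ms with
  | [] => (xs, 0)
  | b :: rest =>
      let s := pvFA l rest (off + 1) xs
      if b then (s.1, s.2 + 1)
      else if 0 < s.2 ∧ (s.2 : Int) ≤ l then (pvMaskI (off + 1) s.2 s.1, 0) else (s.1, 0)

theorem pv_set_star_idem (xs : List Char) (j : Nat) (h : xs.getD j ' ' = '*') :
    xs.set j '*' = xs := by
  by_cases hl : j < xs.length
  · apply List.ext_getElem?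
    intro k
    by_cases hk : j = k
    · subst hk
      rw [List.getElem?_set_self hl]
      rw [List.getD_eq_getElem xs ' ' hl] at h
      simp [List.getElem?_eq_getElem hl, h]
    · rw [List.getElem?_set_ne hk]
  · exact List.set_eq_of_length_le (by omega)

theorem pv_guard_set (xs : List Char) (j : Nat) :
    (if xs.getD j ' ' ≠ '*' then xs.set j '*' else xs) = xs.set j '*' := by
  split_ifs with h
  · rfl
  · exact (pv_set_star_idem xs j (by simpa using h)).symm

theorem pv_foldl_set_eq (r : Nat) : ∀ (a : Nat) (xs : List Char),
    (List.range' a r).foldl (fun acc k => acc.set k '*') xs = pvMaskI a r xs := by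
  induction r with
  | zero => intro a xs; rfl
  | succ n ih => intro a xs; rw [List.range'_succ]; exact ih (a + 1) (xs.set a '*')

theorem pv_gmask_eq (xs : List Char) (a r : Nat) : pvGmaskA xs a r = pvMaskI a r xs := by
  unfold pvGmaskA
  rw [show (fun (acc : List Char) j => if acc.getD j ' ' ≠ '*' then acc.set j '*' else acc)
      = fun (acc : List Char) k => acc.set k '*' from funext fun acc => funext fun j => pv_guard_set acc j]
  exact pv_foldl_set_eq r a xs

theorem pv_maskRunB_eq (xs : List Char) (i j : Nat) : pvMaskRunB xs i j = pvMaskI i (j - i) xs :=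
  pv_foldl_set_eq (j - i) i xs

theorem pv_set_comm_star (xs : List Char) (i j : Nat) :
    (xs.set i '*').set j '*' = (xs.set j '*').set i '*' := by
  by_cases h : i = j
  · subst h; rfl
  · exact List.set_comm '*' '*' h

theorem pv_maskI_set (r : Nat) : ∀ (a j : Nat) (xs : List Char),
    pvMaskI a r (xs.set j '*') = (pvMaskI a r xs).set j '*' := by
  induction r with
  | zero => intro a j xs; rfl
  | succ n ih =>
    intro a j xs
    show pvMaskI (a + 1) n ((xs.set j '*').set a '*') = (pvMaskI (a + 1) n (xs.set a '*')).set j '*'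
    rw [pv_set_comm_star, ih]

theorem pv_maskI_maskI (r : Nat) : ∀ (a b s : Nat) (xs : List Char),
    pvMaskI a r (pvMaskI b s xs) = pvMaskI b s (pvMaskI a r xs) := by
  induction r with
  | zero => intro a b s xs; rfl
  | succ n ih =>
    intro a b s xs
    show pvMaskI (a + 1) n ((pvMaskI b s xs).set a '*') = pvMaskI b s (pvMaskI (a + 1) n (xs.set a '*'))
    rw [← pv_maskI_set, ih]

theorem pv_runs_nil (l : Int) (off : Nat) (xs : List Char) : pvRuns l [] off xs = xs := by
  rw [pvRuns.eq_def]

theorem pv_runs_true (l : Int) (rest : List Bool) (off : Nat) (xs : List Char) :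
    pvRuns l (true :: rest) off xs
      = pvRuns l (rest.drop ((rest.takeWhile id).length))
          (off + ((rest.takeWhile id).length + 1))
          (if (((rest.takeWhile id).length + 1 : Nat) : Int) ≤ l
            then pvMaskI off ((rest.takeWhile id).length + 1) xs else xs) := by
  rw [pvRuns.eq_def]

theorem pv_runs_false (l : Int) (rest : List Bool) (off : Nat) (xs : List Char) :
    pvRuns l (false :: rest) off xs = pvRuns l rest (off + 1) xs := by
  rw [pvRuns.eq_def]

theorem pv_runs_maskI (l : Int) (n : Nat) : ∀ (ms : List Bool), ms.length ≤ n →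
    ∀ (off : Nat) (xs : List Char) (a r : Nat),
    pvRuns l ms off (pvMaskI a r xs) = pvMaskI a r (pvRuns l ms off xs) := by
  induction n with
  | zero =>
    intro ms hms off xs a r
    have : ms = [] := List.eq_nil_of_length_eq_zero (by omega)
    subst this
    rw [pvRuns, pvRuns]
  | succ n ih =>
    intro ms hms off xs a r
    match ms with
    | [] => rw [pvRuns, pvRuns]
    | false :: rest =>
      rw [pvRuns, pvRuns]
      exact ih rest (by simp at hms; omega) (off + 1) xs a r
    | true :: rest =>
      rw [pvRuns, pvRuns]
      have hlen : (rest.drop ((rest.takeWhile id).length)).length ≤ n := by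
        simp only [List.length_drop]
        simp at hms
        omega
      split_ifs with h
      · rw [pv_maskI_maskI ((rest.takeWhile id).length + 1) off a r xs]
        exact ih _ hlen _ _ _ _
      · exact ih _ hlen _ _ _ _

theorem pv_fA_char (l : Int) (ms : List Bool) : ∀ (off : Nat) (xs : List Char),
    pvFA l ms off xs
      = (pvRuns l (ms.drop ((ms.takeWhile id).length)) (off + (ms.takeWhile id).length) xs,
         (ms.takeWhile id).length) := by
  induction ms with
  | nil =>
    intro off xs
    simp only [List.takeWhile_nil, List.length_nil, List.drop_nil, Nat.add_zero]
    rw [pvFA, pv_runs_nil]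
  | cons b rest ih =>
    intro off xs
    cases b with
    | true =>
      rw [pvFA]
      simp only [ih, if_true]
      simp only [List.takeWhile_cons, id, if_true, List.length_cons, List.drop_succ_cons]
      refine Prod.ext ?_ rfl
      rw [show off + ((rest.takeWhile id).length + 1) = off + 1 + (rest.takeWhile id).length by omega]
    | false =>
      rw [pvFA]
      simp only [ih, Bool.false_eq_true, if_false]
      simp only [List.takeWhile_cons, Bool.false_eq_true, id, if_false,
        List.length_nil, List.drop_zero, Nat.add_zero]
      rw [pv_runs_false]
      set p := (rest.takeWhile id).length with hp
      by_cases hp0 : 0 < p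
      · obtain ⟨rest', hrest⟩ : ∃ rest', rest = true :: rest' := by
          cases rest with
          | nil => simp [hp, List.takeWhile] at hp0
          | cons hd tl =>
            cases hd
            · rw [hp] at hp0; simp [List.takeWhile_cons] at hp0
            · exact ⟨tl, rfl⟩
        have hq : p = (rest'.takeWhile id).length + 1 := by
          rw [hp, hrest]; simp [List.takeWhile_cons, id]
        have hrw : pvRuns l rest (off + 1) xs
            = pvRuns l (rest.drop p) (off + 1 + p)
                (if (p : Int) ≤ l then pvMaskI (off + 1) p xs else xs) := by
          conv_lhs => rw [hrest, pvRuns]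
          rw [hrest, hq, List.drop_succ_cons]
        rw [hrw]
        by_cases h2 : (p : Int) ≤ l
        · rw [if_pos h2, if_pos ⟨hp0, h2⟩]
          refine Prod.ext ?_ rfl
          exact (pv_runs_maskI l (rest.drop p).length (rest.drop p) le_rfl (off + 1 + p) xs (off + 1) p).symm
        · rw [if_neg h2, if_neg (fun hc => h2 hc.2)]
      · have hp0' : p = 0 := by omega
        rw [hp0']
        simp only [List.drop_zero, Nat.add_zero, Nat.cast_zero]
        rw [if_neg (by simp)]

theorem pv_extendGo_eq (mt : List Bool) (m : Nat) (hm : m = mt.length) :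
    ∀ (fuel j : Nat), m - j ≤ fuel →
    pvExtendGo mt m fuel j = j + (((mt.drop j).takeWhile id).length) := by
  intro fuel
  induction fuel with
  | zero =>
    intro j hj
    have hnil : mt.drop j = [] := List.drop_eq_nil_of_le (by omega)
    simp [pvExtendGo, hnil]
  | succ fuel ih =>
    intro j hj
    show (if j < m && mt.getD j false then pvExtendGo mt m fuel (j + 1) else j) = _
    by_cases h1 : j < m
    · by_cases h2 : mt.getD j false
      · rw [if_pos (by simp only [h1, decide_true, Bool.true_and]; exact h2)]
        rw [ih (j + 1) (by omega)]
        have hj' : j < mt.length := by omega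
        have hdrop : mt.drop j = true :: mt.drop (j + 1) := by
          rw [List.drop_eq_getElem_cons hj']
          rw [List.getD_eq_getElem mt false hj'] at h2
          rw [h2]
        rw [hdrop]
        simp [List.takeWhile_cons, id]
        omega
      · rw [if_neg (by simp only [Bool.and_eq_true, decide_eq_true_eq, not_and]; exact fun _ => by simpa using h2)]
        have hj' : j < mt.length := by omega
        have hdrop : mt.drop j = false :: mt.drop (j + 1) := by
          rw [List.drop_eq_getElem_cons hj']
          have h2' : mt[j] = false := by
            rw [List.getD_eq_getElem mt false hj'] at h2
            simpa using h2
          rw [h2']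
        simp [hdrop, List.takeWhile_cons]
    · rw [if_neg (by simp [h1])]
      have hnil : mt.drop j = [] := List.drop_eq_nil_of_le (by omega)
      simp [hnil]

theorem pv_extend_eq (mt : List Bool) (m : Nat) (hm : m = mt.length) (j : Nat) :
    pvExtend mt m j = j + (((mt.drop j).takeWhile id).length) :=
  pv_extendGo_eq mt m hm (m - j) j le_rfl

theorem pv_loopBGo_eq (mt : List Bool) (l : Int) (m : Nat) (hm : m = mt.length) :
    ∀ (fuel : Nat) (xs : List Char) (i : Nat), m - i ≤ fuel →
    pvLoopBGo mt l m fuel xs i = pvRuns l (mt.drop i) i xs := by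
  intro fuel
  induction fuel with
  | zero =>
    intro xs i hi
    have hnil : mt.drop i = [] := List.drop_eq_nil_of_le (by omega)
    rw [hnil, pv_runs_nil]
    rfl
  | succ fuel ih =>
    intro xs i hi
    by_cases h : i < m
    · by_cases hmt : mt.getD i false
      · have hi' : i < mt.length := by omega
        have hdropi : mt.drop i = true :: mt.drop (i + 1) := by
          rw [List.drop_eq_getElem_cons hi']
          rw [List.getD_eq_getElem mt false hi'] at hmt
          rw [hmt]
        have he : pvExtend mt m i = i + (((mt.drop (i + 1)).takeWhile id).length + 1) := by
          rw [pv_extend_eq mt m hm i, hdropi]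
          simp [List.takeWhile_cons, id]
        show (if i < m then
            if mt.getD i false then
              pvLoopBGo mt l m fuel
                (if ((pvExtend mt m i - i : Nat) : Int) ≤ l then pvMaskRunB xs i (pvExtend mt m i) else xs)
                (pvExtend mt m i)
            else pvLoopBGo mt l m fuel xs (i + 1)
          else xs) = _
        rw [if_pos h, if_pos hmt, he]
        rw [ih _ _ (by omega)]
        rw [hdropi, pv_runs_true]
        have hdq : (mt.drop (i + 1)).drop (((mt.drop (i + 1)).takeWhile id).length)
            = mt.drop (i + (((mt.drop (i + 1)).takeWhile id).length + 1)) := by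
          rw [List.drop_drop]
          congr 1
          omega
        rw [hdq]
        congr 1
        rw [pv_maskRunB_eq,
          show i + (((mt.drop (i + 1)).takeWhile id).length + 1) - i
            = ((mt.drop (i + 1)).takeWhile id).length + 1 from by omega]
      · have hi' : i < mt.length := by omega
        have hdropi : mt.drop i = false :: mt.drop (i + 1) := by
          rw [List.drop_eq_getElem_cons hi']
          have h2 : mt[i] = false := by
            rw [List.getD_eq_getElem mt false hi'] at hmt
            simpa using hmt
          rw [h2]
        show (if i < m then
            if mt.getD i false then
              pvLoopBGo mt l m fuel
                (if ((pvExtend mt m i - i : Nat) : Int) ≤ l then pvMaskRunB xs i (pvExtend mt m i) else xs)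
                (pvExtend mt m i)
            else pvLoopBGo mt l m fuel xs (i + 1)
          else xs) = _
        rw [if_pos h, if_neg hmt]
        rw [ih _ _ (by omega), hdropi, pv_runs_false]
    · have hnil : mt.drop i = [] := List.drop_eq_nil_of_le (by omega)
      show (if i < m then
          if mt.getD i false then
            pvLoopBGo mt l m fuel
              (if ((pvExtend mt m i - i : Nat) : Int) ≤ l then pvMaskRunB xs i (pvExtend mt m i) else xs)
              (pvExtend mt m i)
          else pvLoopBGo mt l m fuel xs (i + 1)
        else xs) = _
      rw [if_neg h, hnil, pv_runs_nil]

theorem pv_loopB_eq (mt : List Bool) (l : Int) (m : Nat) (hm : m = mt.length)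
    (xs : List Char) (i : Nat) : pvLoopB mt l m xs i = pvRuns l (mt.drop i) i xs :=
  pv_loopBGo_eq mt l m hm (m - i) xs i le_rfl

theorem pv_fold_eq_fA (l : Int) (cond : Nat → Bool) :
    ∀ (cnt off : Nat) (xs : List Char),
    (List.range' off cnt).foldr
      (fun i (s : List Char × Nat) => if cond i then (s.1, s.2 + 1)
        else if 0 < s.2 ∧ (s.2 : Int) ≤ l then (pvGmaskA s.1 (i + 1) s.2, 0) else (s.1, 0))
      (xs, 0)
      = pvFA l ((List.range' off cnt).map cond) off xs := by
  intro cnt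
  induction cnt with
  | zero => intro off xs; rfl
  | succ n ih =>
    intro off xs
    rw [List.range'_succ]
    simp only [List.foldr_cons, List.map_cons]
    rw [ih (off + 1) xs, pvFA]
    by_cases h1 : cond off
    · simp [h1]
    · simp only [h1, Bool.false_eq_true, if_false]
      split_ifs with h2
      · rw [pv_gmask_eq]
      · rfl

-- the match table of the ports equals the zip form used by D_
theorem pv_ms_eq_zip (bs ns : List Char) :
    (List.range (min bs.length ns.length)).map
        (fun i => bs.getD i ' ' == ns.getD i ' ' && bs.getD i ' ' != '*')
      = (bs.zip ns).map (fun ab => ab.1 == ab.2 && ab.1 != '*') := by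
  apply List.ext_getElem
  · simp
  · intro i h1 h2
    simp only [List.getElem_map, List.getElem_range, List.getElem_zip]
    have hi : i < min bs.length ns.length := by simpa using h1
    have hb : i < bs.length := by omega
    have hn : i < ns.length := by omega
    rw [List.getD_eq_getElem bs ' ' hb, List.getD_eq_getElem ns ' ' hn]

theorem pv_runs_prefix (l : Int) (ms : List Bool) (off : Nat) (xs : List Char)
    (hp : 0 < (ms.takeWhile id).length) :
    pvRuns l ms off xs
      = pvRuns l (ms.drop ((ms.takeWhile id).length)) (off + (ms.takeWhile id).length)
          (if (((ms.takeWhile id).length : Nat) : Int) ≤ l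
            then pvMaskI off ((ms.takeWhile id).length) xs else xs) := by
  obtain ⟨rest, hrest⟩ : ∃ rest, ms = true :: rest := by
    cases ms with
    | nil => simp [List.takeWhile] at hp
    | cons hd tl =>
      cases hd
      · simp [List.takeWhile_cons] at hp
      · exact ⟨tl, rfl⟩
  subst hrest
  have hq : (List.takeWhile id (true :: rest)).length = (rest.takeWhile id).length + 1 := by
    simp [List.takeWhile_cons, id]
  rw [hq, pvRuns, List.drop_succ_cons]

-- assembly: evaluated forms of the two ports

def pvMs (base neighbor : String) : List Bool :=
  (List.range (min base.toList.length neighbor.toList.length)).map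
    (fun i => base.toList.getD i ' ' == neighbor.toList.getD i ' ' && base.toList.getD i ' ' != '*')

theorem pv_A_to_fA (bs ns : List Char) (l : Int) (m : Nat) :
    ((List.range m).reverse).foldl
      (fun (s : List Char × Nat) (i : Nat) =>
        if bs.getD i ' ' == ns.getD i ' ' && bs.getD i ' ' != '*' then (s.1, s.2 + 1)
        else if 0 < s.2 ∧ (s.2 : Int) ≤ l then (pvGmaskA s.1 (i + 1) s.2, 0) else (s.1, 0))
      (bs, 0)
      = pvFA l ((List.range m).map (fun i => bs.getD i ' ' == ns.getD i ' ' && bs.getD i ' ' != '*')) 0 bs := by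
  rw [List.foldl_reverse, List.range_eq_range']
  exact pv_fold_eq_fA l (fun i => bs.getD i ' ' == ns.getD i ' ' && bs.getD i ' ' != '*') m 0 bs

theorem pv_A_eval (base neighbor : String) (l : Int) :
    mask_similar_from_end base neighbor l
      = String.mk
          (if 0 < ((pvMs base neighbor).takeWhile id).length
              ∧ ((((pvMs base neighbor).takeWhile id).length : Nat) : Int) ≤ l
            then pvGmaskA
                (pvRuns l ((pvMs base neighbor).drop (((pvMs base neighbor).takeWhile id).length))
                  (0 + ((pvMs base neighbor).takeWhile id).length) base.toList)
                (base.toList.length - ((pvMs base neighbor).takeWhile id).length)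
                (((pvMs base neighbor).takeWhile id).length)
            else pvRuns l ((pvMs base neighbor).drop (((pvMs base neighbor).takeWhile id).length))
                  (0 + ((pvMs base neighbor).takeWhile id).length) base.toList) := by
  simp only [mask_similar_from_end]
  rw [pv_A_to_fA base.toList neighbor.toList l (min base.toList.length neighbor.toList.length)]
  rw [pv_fA_char]
  rfl

theorem pv_B_eval (base neighbor : String) (l : Int) :
    mask_similar_from_end_alt base neighbor l
      = String.mk (pvRuns l (pvMs base neighbor) 0 base.toList) := by
  simp only [mask_similar_from_end_alt]
  rw [pv_loopB_eq _ _ _ (by simp)]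
  rw [List.drop_zero]
  rfl

theorem pv_zip_len (base neighbor : String) :
    ((base.toList.zip neighbor.toList).takeWhile (fun ab => ab.1 == ab.2 && ab.1 != '*')).length
      = ((pvMs base neighbor).takeWhile id).length := by
  unfold pvMs
  rw [pv_ms_eq_zip, List.takeWhile_map]
  simp [Function.comp]

theorem pv_ms_length (base neighbor : String) :
    (pvMs base neighbor).length = min base.toList.length neighbor.toList.length := by
  simp [pvMs]

theorem pv_main (base neighbor : String) (l : Int)
    (hD : ¬ D_mask_similar_from_end base neighbor l) :
    mask_similar_from_end base neighbor l = mask_similar_from_end_alt base neighbor l := by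
  rw [pv_A_eval, pv_B_eval]
  have hD' : ¬ (0 < ((pvMs base neighbor).takeWhile id).length
      ∧ ((((pvMs base neighbor).takeWhile id).length : Nat) : Int) ≤ l
      ∧ ((pvMs base neighbor).takeWhile id).length < base.toList.length) := by
    intro hc
    apply hD
    simp only [D_mask_similar_from_end]
    rw [pv_zip_len]
    exact hc
  have hple : ((pvMs base neighbor).takeWhile id).length ≤ (pvMs base neighbor).length :=
    (List.takeWhile_prefix id).length_le
  have hml : (pvMs base neighbor).length = min base.toList.length neighbor.toList.length :=
    pv_ms_length base neighbor
  by_cases hp0 : 0 < ((pvMs base neighbor).takeWhile id).length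
  · by_cases hpl : ((((pvMs base neighbor).takeWhile id).length : Nat) : Int) ≤ l
    · have hpL : ((pvMs base neighbor).takeWhile id).length = base.toList.length := by
        have hnlt : ¬ ((pvMs base neighbor).takeWhile id).length < base.toList.length :=
          fun hlt => hD' ⟨hp0, hpl, hlt⟩
        omega
      have hdropnil : (pvMs base neighbor).drop (((pvMs base neighbor).takeWhile id).length) = [] := by
        apply List.drop_eq_nil_of_le
        omega
      rw [if_pos ⟨hp0, hpl⟩, hdropnil, pv_runs_nil, pv_gmask_eq,
        show base.toList.length - ((pvMs base neighbor).takeWhile id).length = 0 from by omega]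
      rw [pv_runs_prefix l (pvMs base neighbor) 0 base.toList hp0, hdropnil, pv_runs_nil,
        if_pos hpl]
    · rw [if_neg (fun hc => hpl hc.2)]
      rw [pv_runs_prefix l (pvMs base neighbor) 0 base.toList hp0, if_neg hpl]
  · have hp00 : ((pvMs base neighbor).takeWhile id).length = 0 := by omega
    rw [if_neg (fun hc => hp0 hc.1), hp00]
    rw [List.drop_zero, Nat.add_zero]

-- lemmas for the tightness theorem: positions below the write region are unchanged

theorem pv_maskI_getD_lt (r : Nat) : ∀ (a k : Nat) (xs : List Char) (d : Char), k < a →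
    (pvMaskI a r xs).getD k d = xs.getD k d := by
  induction r with
  | zero => intro a k xs d _; rfl
  | succ n ih =>
    intro a k xs d hk
    show (pvMaskI (a + 1) n (xs.set a '*')).getD k d = _
    rw [ih (a + 1) k _ d (by omega)]
    rw [List.getD_eq_getElem?_getD, List.getD_eq_getElem?_getD,
      List.getElem?_set_ne (by omega : a ≠ k)]

theorem pv_runs_getD_lt (l : Int) (n : Nat) : ∀ (ms : List Bool), ms.length ≤ n →
    ∀ (off : Nat) (xs : List Char) (k : Nat) (d : Char), k < off →
    (pvRuns l ms off xs).getD k d = xs.getD k d := by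
  induction n with
  | zero =>
    intro ms hms off xs k d hk
    obtain rfl : ms = [] := List.eq_nil_of_length_eq_zero (by omega)
    rw [pv_runs_nil]
  | succ n ih =>
    intro ms hms off xs k d hk
    match ms with
    | [] => rw [pv_runs_nil]
    | false :: rest =>
      rw [pv_runs_false]
      exact ih rest (by simp at hms; omega) (off + 1) xs k d (by omega)
    | true :: rest =>
      rw [pv_runs_true]
      rw [ih _ (by simp only [List.length_drop]; simp at hms; omega) _ _ k d (by omega)]
      split_ifs with h
      · exact pv_maskI_getD_lt _ off k xs d (by omega)
      · rfl

theorem pv_maskI_getD0 (r : Nat) (xs : List Char) (h0 : 0 < r) (hl : 0 < xs.length) :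
    (pvMaskI 0 r xs).getD 0 ' ' = '*' := by
  match r, h0 with
  | rr + 1, _ =>
    show (pvMaskI 1 rr (xs.set 0 '*')).getD 0 ' ' = '*'
    rw [pv_maskI_getD_lt rr 1 0 _ ' ' (by omega)]
    rw [List.getD_eq_getElem?_getD, List.getElem?_set_self (by omega)]
    rfl

theorem pv_ms_head_true (base neighbor : String)
    (hp0 : 0 < ((pvMs base neighbor).takeWhile id).length) :
    base.toList.getD 0 ' ' ≠ '*' := by
  have hlen : ((pvMs base neighbor).takeWhile id).length ≤ (pvMs base neighbor).length :=
    (List.takeWhile_prefix id).length_le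
  have h0 : 0 < (pvMs base neighbor).length := by omega
  have hhead : (pvMs base neighbor).getD 0 false = true := by
    rcases hms : pvMs base neighbor with _ | ⟨b, tl⟩
    · rw [hms] at h0; simp at h0
    · rw [hms] at hp0
      cases b
      · simp [List.takeWhile_cons] at hp0
      · rfl
  rw [List.getD_eq_getElem _ _ h0] at hhead
  simp only [pvMs, List.getElem_map, List.getElem_range] at hhead
  intro hstar
  rw [hstar] at hhead
  simp at hhead

theorem pv_tight (base neighbor : String) (l : Int)
    (hd : D_mask_similar_from_end base neighbor l) :
    mask_similar_from_end base neighbor l ≠ mask_similar_from_end_alt base neighbor l := by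
  have hd' : 0 < ((pvMs base neighbor).takeWhile id).length
      ∧ ((((pvMs base neighbor).takeWhile id).length : Nat) : Int) ≤ l
      ∧ ((pvMs base neighbor).takeWhile id).length < base.toList.length := by
    have := hd
    simp only [D_mask_similar_from_end] at this
    rwa [pv_zip_len] at this
  obtain ⟨hp0, hpl, hplt⟩ := hd'
  rw [pv_A_eval, pv_B_eval]
  intro heq
  have hlists := String.ofList_inj.mp heq
  have hA : ((if 0 < ((pvMs base neighbor).takeWhile id).length
      ∧ ((((pvMs base neighbor).takeWhile id).length : Nat) : Int) ≤ l
      then pvGmaskA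
          (pvRuns l ((pvMs base neighbor).drop (((pvMs base neighbor).takeWhile id).length))
            (0 + ((pvMs base neighbor).takeWhile id).length) base.toList)
          (base.toList.length - ((pvMs base neighbor).takeWhile id).length)
          (((pvMs base neighbor).takeWhile id).length)
      else pvRuns l ((pvMs base neighbor).drop (((pvMs base neighbor).takeWhile id).length))
            (0 + ((pvMs base neighbor).takeWhile id).length) base.toList) : List Char).getD 0 ' '
      = base.toList.getD 0 ' ' := by
    rw [if_pos ⟨hp0, hpl⟩, pv_gmask_eq]
    rw [pv_maskI_getD_lt _ _ _ _ _ (by omega)]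
    rw [pv_runs_getD_lt l ((pvMs base neighbor).drop (((pvMs base neighbor).takeWhile id).length)).length _ le_rfl _ _ 0 ' ' (by omega)]
  have hB : (pvRuns l (pvMs base neighbor) 0 base.toList).getD 0 ' ' = '*' := by
    rw [pv_runs_prefix l (pvMs base neighbor) 0 base.toList hp0, if_pos hpl]
    rw [pv_runs_getD_lt l ((pvMs base neighbor).drop (((pvMs base neighbor).takeWhile id).length)).length _ le_rfl _ _ 0 ' ' (by omega)]
    exact pv_maskI_getD0 _ _ hp0 (by omega)
  rw [hlists, hB] at hA
  exact pv_ms_head_true base neighbor hp0 hA.symm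

-- ===== VERDICT (by name: the statement is the Claim_ definition above) =====
theorem mask_similar_from_end_spec : Claim_unchanged_mask_similar_from_end := by
  intro base neighbor l _ hD
  exact pv_main base neighbor l hD
theorem mask_similar_from_end_changed : Claim_changed_mask_similar_from_end := by
  unfold Claim_changed_mask_similar_from_end
  decide
theorem mask_similar_from_end_tight : Claim_exact_mask_similar_from_end := by
  intro base neighbor l _ hd
  exact pv_tight base neighbor l hd
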